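-- pv_equiv track=rewrite | github.com/OluchukwuJoseph/alx-interview | 0x02-minimum_operations/first-try.py | minOperations
-- ===== SOURCE A (Python) =====
-- def minOperations(target: int) -> int:
--     """
--     The function works by finding the largest divisor of 'target' and
--     recursively calculating the operations for that divisor.
--
--     :param target: The desired number of 'H' characters.
--     :return: The minimum number of operations to achieve exactly
--         'target' 'H' characters.
--     """
--     # Initialize total_operations to store the number of operations required
--     total_operations = 0
--
--     # Start by checking divisors from (target - 1) downwards
--     divisor = target - 1
--
--     while divisor > 1:
--         if target % divisor == 0:
--             # Calculate the number of operations by dividing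
--             # the target by the divisor
--             total_operations += target // divisor
--
--             # Recursively find the minimum operations for the divisor
--             while True:
--                 # Recursively call minOperations to handle the divisor
--                 next_operations = minOperations(divisor)
--
--                 # Add the result from the recursive call to total_operations
--                 total_operations += next_operations
--
--                 # If the recursive call returned a valid result, break the loop
--                 if next_operations:
--                     break
--             break
--
--         # Decrease the divisor to check the next possible divisor
--         divisor -= 1
--
--     # If no divisors were found, the target is prime,
--         # so return the target itself
--     if total_operations == 0:
--         total_operations = target
--
--     return total_operations
-- ===== SOURCE B (Python) =====
-- def minOperations(target: int) -> int:
--     # Trial division up to sqrt(n): sum the prime factors of target with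
--     # multiplicity (for target < 2, no divisor scan ever fires, so return target).
--     if target < 2:
--         return target
--     total = 0
--     n = target
--     p = 2
--     while p * p <= n:
--         if n % p == 0:
--             total += p
--             n //= p
--         else:
--             p += 1
--     if n > 1:
--         total += n
--     return total
-- ===== Notes on version B (the rewrite author's own statement) =====
-- stated objective: faster
-- what changed: A recursively scans divisors downward from target-1 (O(target) per level); B sums the prime factors directly by trial division up to sqrt(n), no recursion and no downward scan.
import Mathlib
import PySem

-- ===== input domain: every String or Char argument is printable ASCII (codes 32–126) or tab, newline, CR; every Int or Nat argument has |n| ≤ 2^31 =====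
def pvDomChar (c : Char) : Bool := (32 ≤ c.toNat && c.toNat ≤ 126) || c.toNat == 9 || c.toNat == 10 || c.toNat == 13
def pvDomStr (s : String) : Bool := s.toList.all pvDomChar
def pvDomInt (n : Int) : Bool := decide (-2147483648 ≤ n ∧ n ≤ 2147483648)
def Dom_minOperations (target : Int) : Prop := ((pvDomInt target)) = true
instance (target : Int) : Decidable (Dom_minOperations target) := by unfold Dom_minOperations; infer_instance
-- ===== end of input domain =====

-- B replaces A's downward divisor scan + recursion by a single trial-division
-- loop up to sqrt(n) summing the prime factors of target (objective: faster).

-- ===== PORT A =====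
-- A's outer `while divisor > 1` scan, scanning divisors downward.  A's inner
-- `while True` loop always breaks after its first iteration because the
-- recursive result is nonzero there (divisor ≥ 2); it is ported as that single
-- iteration (`target // divisor + rec divisor`).
def findLoopA (rec : Int → Int) (target : Int) (divisor : Int) : Int :=
  if divisor > 1 then
    if PySem.Int.mod target divisor = 0 then
      PySem.Int.floordiv target divisor + rec divisor
    else
      findLoopA rec target (divisor - 1)
  else 0
termination_by divisor.toNat
decreasing_by omega

-- A's recursion, made total with a fuel counter (recursive calls are on
-- divisor < target, so target.toNat + 1 units of fuel always suffice).
def minOpFuel : Nat → Int → Int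
  | 0, _ => 0
  | fuel + 1, target =>
    let total := findLoopA (minOpFuel fuel) target (target - 1)
    if total = 0 then target else total

def minOperations (target : Int) : Int := minOpFuel (target.toNat + 1) target

-- ===== PORT B =====
-- Source B's single `while p * p <= n` loop, made total with fuel (2 * n.toNat
-- units always suffice: each step halves n or increments p ≤ n).
def trialFuel : Nat → Int → Int → Int → Int
  | 0, _, _, total => total
  | fuel + 1, n, p, total =>
    if p * p ≤ n then
      if PySem.Int.mod n p = 0 then
        trialFuel fuel (PySem.Int.floordiv n p) p (total + p)
      else
        trialFuel fuel n (p + 1) total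
    else if n > 1 then total + n else total

def minOperations_alt (target : Int) : Int :=
  if target < 2 then target
  else trialFuel (2 * target.toNat) target 2 0

-- ===== PRECONDITION & SPEC =====
def Spec_minOperations (target : Int) (out : Int) : Prop := out = minOperations_alt target
instance (target : Int) (out : Int) : Decidable (Spec_minOperations target out) := by unfold Spec_minOperations; infer_instance

-- ===== CLAIM (what is proved, stated in full; the proofs are below) =====
def Claim_equal_minOperations : Prop := ∀ (target : Int), Dom_minOperations target → Spec_minOperations target (minOperations target)

-- ===== LEMMAS AND PROOFS =====

-- findLoopA only calls `rec` on divisors d' with 1 < d' ≤ divisor.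
theorem findLoopA_congr (rec₁ rec₂ : Int → Int) (target divisor : Int)
    (h : ∀ d', 1 < d' → d' ≤ divisor → rec₁ d' = rec₂ d') :
    findLoopA rec₁ target divisor = findLoopA rec₂ target divisor := by
  rw [findLoopA]; conv_rhs => rw [findLoopA]
  by_cases h1 : divisor > 1
  · simp only [if_pos h1]
    by_cases hm : PySem.Int.mod target divisor = 0
    · simp only [if_pos hm, h divisor h1 le_rfl]
    · simp only [if_neg hm]
      exact findLoopA_congr rec₁ rec₂ target (divisor - 1)
        (fun d' h1' h2' => h d' h1' (by omega))
  · simp only [if_neg h1]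
termination_by divisor.toNat
decreasing_by omega

theorem findLoopA_bot (rec : Int → Int) (target d : Int) (hd : d ≤ 1) :
    findLoopA rec target d = 0 := by
  have h1 : ¬ d > 1 := by omega
  rw [findLoopA]; simp [h1]

-- scanning down from d to D when no divisor lies strictly between
theorem findLoopA_scan (rec : Int → Int) (target D d : Int) (hDd : D ≤ d)
    (h : ∀ k, D < k → k ≤ d → ¬ k ∣ target) :
    findLoopA rec target d = findLoopA rec target D := by
  rcases eq_or_lt_of_le hDd with rfl | hlt
  · rfl
  · by_cases h1 : d > 1
    · rw [findLoopA, if_pos h1,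
        if_neg (by simp only [PySem.Int.mod_eq_zero_iff_dvd]
                   exact fun hdvd => h d hlt le_rfl hdvd)]
      exact findLoopA_scan rec target D (d - 1) (by omega)
        (fun k hk1 hk2 => h k hk1 (by omega))
    · rw [findLoopA_bot rec target d (by omega),
        findLoopA_bot rec target D (by omega)]
termination_by (d - D).toNat
decreasing_by omega

theorem minOpFuel_stable : ∀ N (t : Int) (f₁ f₂ : Nat), t.toNat ≤ N →
    t.toNat < f₁ → t.toNat < f₂ → minOpFuel f₁ t = minOpFuel f₂ t := by
  intro N
  induction N with
  | zero =>
    intro t f₁ f₂ hN h1 h2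
    obtain ⟨g₁, rfl⟩ : ∃ g, f₁ = g + 1 := ⟨f₁ - 1, by omega⟩
    obtain ⟨g₂, rfl⟩ : ∃ g, f₂ = g + 1 := ⟨f₂ - 1, by omega⟩
    have ht : t ≤ 0 := by omega
    rw [minOpFuel, minOpFuel,
      findLoopA_bot _ _ _ (by omega), findLoopA_bot _ _ _ (by omega)]
  | succ N ih =>
    intro t f₁ f₂ hN h1 h2
    obtain ⟨g₁, rfl⟩ : ∃ g, f₁ = g + 1 := ⟨f₁ - 1, by omega⟩
    obtain ⟨g₂, rfl⟩ : ∃ g, f₂ = g + 1 := ⟨f₂ - 1, by omega⟩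
    rw [minOpFuel, minOpFuel,
      findLoopA_congr (minOpFuel g₁) (minOpFuel g₂) t (t - 1)
        (fun d' hd1 hd2 => ih d' g₁ g₂ (by omega) (by omega) (by omega))]

theorem minOp_small (t : Int) (ht : t < 2) : minOperations t = t := by
  unfold minOperations
  obtain ⟨g, hg⟩ : ∃ g, t.toNat + 1 = g + 1 := ⟨t.toNat, rfl⟩
  rw [hg, minOpFuel, findLoopA_bot _ _ _ (by omega)]
  simp

theorem int_dvd_iff_toNat (a b : Int) (ha : 0 ≤ a) (hb : 0 ≤ b) :
    a ∣ b ↔ a.toNat ∣ b.toNat := by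
  rw [← Int.natCast_dvd_natCast, Int.toNat_of_nonneg ha, Int.toNat_of_nonneg hb]

-- the scan either finds no divisor or stops at the first (largest) one
theorem findLoopA_cases (rec : Int → Int) (t d : Int) :
    findLoopA rec t d = 0 ∨ ∃ d', 1 < d' ∧ d' ≤ d ∧ d' ∣ t ∧
      findLoopA rec t d = PySem.Int.floordiv t d' + rec d' := by
  rw [findLoopA]
  by_cases h1 : d > 1
  · by_cases hm : PySem.Int.mod t d = 0
    · exact Or.inr ⟨d, h1, le_rfl, (PySem.Int.mod_eq_zero_iff_dvd t d).mp hm, by simp [h1, hm]⟩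
    · simp only [if_pos h1, if_neg hm]
      rcases findLoopA_cases rec t (d - 1) with h | ⟨d', h2, h3, h4, h5⟩
      · exact Or.inl h
      · exact Or.inr ⟨d', h2, by omega, h4, h5⟩
  · simp [h1]
termination_by d.toNat
decreasing_by omega

theorem minOp_prime (t : Int) (ht : 2 ≤ t) (hp : Nat.Prime t.toNat) :
    minOperations t = t := by
  unfold minOperations
  rw [minOpFuel, findLoopA_scan _ t 1 (t - 1) (by omega) ?hscan,
    findLoopA_bot _ _ _ le_rfl]
  · simp
  case hscan =>
    intro k h1 h2 hdvd
    have hk := (int_dvd_iff_toNat k t (by omega) (by omega)).mp hdvd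
    rcases hp.eq_one_or_self_of_dvd k.toNat hk with h | h <;> omega

theorem minOp_pos : ∀ N (t : Int), t.toNat ≤ N → 2 ≤ t → 2 ≤ minOperations t := by
  intro N
  induction N with
  | zero => intro t hN ht; omega
  | succ N ih =>
    intro t hN ht
    unfold minOperations
    rw [minOpFuel]
    rcases findLoopA_cases (minOpFuel t.toNat) t (t - 1) with h | ⟨d', h2, h3, h4, h5⟩
    · rw [h]; simp; omega
    · simp only [h5]
      have hrec : minOpFuel t.toNat d' = minOperations d' := by
        have := minOpFuel_stable N d' t.toNat (d'.toNat + 1) (by omega) (by omega) (by omega)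
        unfold minOperations; omega
      have hdiv : 1 ≤ PySem.Int.floordiv t d' := by
        rw [PySem.Int.le_floordiv_iff_mul_le (by omega)]; omega
      have hpos : 2 ≤ minOperations d' := ih d' (by omega) (by omega)
      rw [hrec]
      have : ¬ (PySem.Int.floordiv t d' + minOperations d' = 0) := by omega
      simp only [this, if_false]
      omega

theorem minOp_composite (t : Int) (ht : 2 ≤ t) (hp : ¬ Nat.Prime t.toNat) :
    minOperations t = (t.toNat.minFac : Int) + minOperations ((t.toNat / t.toNat.minFac : Nat) : Int) := by
  have hn1 : t.toNat ≠ 1 := by omega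
  have hqp : t.toNat.minFac.Prime := Nat.minFac_prime hn1
  have hq2 : 2 ≤ t.toNat.minFac := hqp.two_le
  have hqdvd : t.toNat.minFac ∣ t.toNat := Nat.minFac_dvd t.toNat
  have hqlt : t.toNat.minFac < t.toNat := by
    rcases lt_or_eq_of_le (Nat.le_of_dvd (by omega) hqdvd) with h | h
    · exact h
    · exact absurd (h ▸ hqp) hp
  -- D = the largest proper divisor
  set D : Nat := t.toNat / t.toNat.minFac with hD
  have hnqD : t.toNat.minFac * D = t.toNat := Nat.mul_div_cancel' hqdvd
  have hDdvd : D ∣ t.toNat := Nat.div_dvd_of_dvd hqdvd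
  have hD2 : 2 ≤ D := by
    rcases Nat.lt_or_ge D 2 with h | h
    · interval_cases D <;> omega
    · exact h
  have hDlt : D < t.toNat := Nat.div_lt_self (by omega) (by omega)
  have hmax : ∀ k : Nat, k ∣ t.toNat → 1 < k → k < t.toNat → k ≤ D := by
    intro k hk h1 h2
    have hck : t.toNat / k ∣ t.toNat := Nat.div_dvd_of_dvd hk
    have hckmul : k * (t.toNat / k) = t.toNat := Nat.mul_div_cancel' hk
    have hck2 : 2 ≤ t.toNat / k := by
      rcases Nat.lt_or_ge (t.toNat / k) 2 with h | h
      · interval_cases (t.toNat / k) <;> omega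
      · exact h
    have hqle : t.toNat.minFac ≤ t.toNat / k := Nat.minFac_le_of_dvd hck2 hck
    rw [hD, Nat.le_div_iff_mul_le (by omega)]
    calc k * t.toNat.minFac ≤ k * (t.toNat / k) := by
          exact Nat.mul_le_mul_left k hqle
      _ = t.toNat := hckmul
  -- evaluate A's scan: it stops at D
  have hscan : ∀ k : Int, (D : Int) < k → k ≤ t - 1 → ¬ k ∣ t := by
    intro k hk1 hk2 hdvd
    have hk := (int_dvd_iff_toNat k t (by omega) (by omega)).mp hdvd
    have := hmax k.toNat hk (by omega) (by omega)
    omega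
  have h1 : ((D : Nat) : Int) > 1 := by omega
  have hmod : PySem.Int.mod t ((D : Nat) : Int) = 0 := by
    rw [PySem.Int.mod_eq_zero_iff_dvd, int_dvd_iff_toNat _ _ (by omega) (by omega)]
    simpa using hDdvd
  have hfd : PySem.Int.floordiv t ((D : Nat) : Int) = (t.toNat.minFac : Int) := by
    have ht' : t = ((t.toNat : Nat) : Int) := by omega
    have hdd : t.toNat / D = t.toNat.minFac := Nat.div_div_self hqdvd (by omega)
    calc PySem.Int.floordiv t ((D : Nat) : Int)
        = ((t.toNat / D : Nat) : Int) := by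
          conv_lhs => rw [ht']
          exact PySem.Int.floordiv_natCast _ _
      _ = (t.toNat.minFac : Int) := by rw [hdd]
  have hrec : minOpFuel t.toNat ((D : Nat) : Int) = minOperations ((D : Nat) : Int) :=
    minOpFuel_stable t.toNat ((D : Nat) : Int) t.toNat ((((D : Nat) : Int)).toNat + 1)
      (by omega) (by omega) (by omega)
  have hpos : 2 ≤ minOperations ((D : Nat) : Int) :=
    minOp_pos D ((D : Nat) : Int) (by omega) (by omega)
  have hstart : minOperations t = minOpFuel (t.toNat + 1) t := rfl
  rw [hstart, minOpFuel, findLoopA_scan _ t ((D : Nat) : Int) (t - 1) (by omega) hscan,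
    findLoopA, if_pos h1, if_pos hmod, hfd, hrec]
  have hne : ¬ ((t.toNat.minFac : Int) + minOperations ((D : Nat) : Int) = 0) := by omega
  simp only [hne, if_false]

theorem trial_main : ∀ fuel (n p total : Int), 2 ≤ p → 2 ≤ n → p ≤ n + 1 →
    (∀ k : Int, 2 ≤ k → k < p → ¬ k ∣ n) →
    2 * n.toNat + 2 ≤ fuel + p.toNat →
    trialFuel fuel n p total = total + minOperations n := by
  intro fuel
  induction fuel with
  | zero => intro n p total hp hn hpn hinv hfuel; omega
  | succ fuel ih =>
    intro n p total hp hn hpn hinv hfuel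
    rw [trialFuel]
    by_cases hpp : p * p ≤ n
    · rw [if_pos hpp]
      have hpn' : p ≤ n := le_trans (by nlinarith) hpp
      by_cases hm : PySem.Int.mod n p = 0
      · rw [if_pos hm]
        obtain ⟨c, hc⟩ := (PySem.Int.mod_eq_zero_iff_dvd n p).mp hm
        have hcge : p ≤ c := by nlinarith
        have hfd : PySem.Int.floordiv n p = c := by
          rw [PySem.Int.floordiv_eq_ediv_of_pos (by omega), hc,
            Int.mul_ediv_cancel_left c (by omega)]
        have h2c : 2 * c ≤ n := by nlinarith
        have hcast : n.toNat = p.toNat * c.toNat := by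
          have h1 : ((n.toNat : Nat) : Int) = ((p.toNat : Nat) : Int) * ((c.toNat : Nat) : Int) := by
            rw [Int.toNat_of_nonneg (by omega), Int.toNat_of_nonneg (by omega),
              Int.toNat_of_nonneg (by omega)]
            exact hc
          exact_mod_cast h1
        -- p is the least factor of n
        have hq2 : 2 ≤ n.toNat.minFac := (Nat.minFac_prime (by omega)).two_le
        have hqdvdN : n.toNat.minFac ∣ n.toNat := Nat.minFac_dvd n.toNat
        have hqdvd : ((n.toNat.minFac : Nat) : Int) ∣ n := by
          rw [int_dvd_iff_toNat _ _ (by omega) (by omega)]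
          simpa using hqdvdN
        have hple : n.toNat.minFac ≤ p.toNat :=
          Nat.minFac_le_of_dvd (by omega) ((int_dvd_iff_toNat p n (by omega) (by omega)).mp ⟨c, hc⟩)
        have hpge : p.toNat ≤ n.toNat.minFac := by
          by_contra hlt
          exact hinv ((n.toNat.minFac : Nat) : Int) (by omega) (by omega) hqdvd
        have hq : ((n.toNat.minFac : Nat) : Int) = p := by omega
        have hnp : ¬ Nat.Prime n.toNat := by
          intro hpr
          have := hpr.minFac_eq
          have hplt : p < n := by nlinarith
          omega
        have hcval : ((n.toNat / n.toNat.minFac : Nat) : Int) = c := by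
          have hmf : n.toNat.minFac = p.toNat := by omega
          rw [hmf, hcast, Nat.mul_div_cancel_left _ (by omega)]
          omega
        rw [hfd, ih c p (total + p) hp (by omega) (by omega)
          (fun k hk2 hkp hkdvd => hinv k hk2 hkp (hkdvd.trans ⟨p, by rw [hc]; ring⟩))
          (by omega),
          minOp_composite n hn hnp, hq, hcval]
        ring
      · rw [if_neg hm]
        have hnd : ¬ p ∣ n := fun hd => hm ((PySem.Int.mod_eq_zero_iff_dvd n p).mpr hd)
        refine ih n (p + 1) total (by omega) hn (by omega) ?_ (by omega)
        intro k hk2 hkp hkdvd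
        by_cases hkeq : k = p
        · exact hnd (hkeq ▸ hkdvd)
        · exact hinv k hk2 (by omega) hkdvd
    · rw [if_neg hpp, if_pos (show n > 1 by omega)]
      have hprime : Nat.Prime n.toNat := by
        by_contra hnp
        have hsq : n.toNat.minFac ^ 2 ≤ n.toNat := Nat.minFac_sq_le_self (by omega) hnp
        have hq2 : 2 ≤ n.toNat.minFac := (Nat.minFac_prime (by omega)).two_le
        have hqdvd : ((n.toNat.minFac : Nat) : Int) ∣ n := by
          rw [int_dvd_iff_toNat _ _ (by omega) (by omega)]
          simpa using Nat.minFac_dvd n.toNat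
        have hpq : p ≤ ((n.toNat.minFac : Nat) : Int) := by
          by_contra hlt
          exact hinv ((n.toNat.minFac : Nat) : Int) (by omega) (by omega) hqdvd
        have h1 : ((n.toNat.minFac : Nat) : Int) * ((n.toNat.minFac : Nat) : Int) ≤ n := by
          have : ((n.toNat.minFac ^ 2 : Nat) : Int) ≤ ((n.toNat : Nat) : Int) := by
            exact_mod_cast hsq
          rw [Int.toNat_of_nonneg (by omega)] at this
          calc ((n.toNat.minFac : Nat) : Int) * ((n.toNat.minFac : Nat) : Int)
              = ((n.toNat.minFac ^ 2 : Nat) : Int) := by push_cast; ring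
            _ ≤ n := this
        nlinarith
      rw [minOp_prime n hn hprime]

-- ===== VERDICT (by name: the statement is the Claim_ definition above) =====
theorem minOperations_spec : Claim_equal_minOperations := by
  intro t _
  unfold Spec_minOperations minOperations_alt
  by_cases h2 : t < 2
  · simp [h2, minOp_small t h2]
  · have h2 : 2 ≤ t := by omega
    rw [if_neg (by omega)]
    rw [trial_main (2 * t.toNat) t 2 0 (by omega) h2 (by omega)
      (by intro k hk hk2; omega) (by omega)]
    ring
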